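-- pv_equiv track=rewrite | github.com/paiml/depyler | examples/hard_compute_expression.py | count_ops_in_expr
-- ===== SOURCE A (Python) =====
-- def count_ops_in_expr(expr: str) -> int:
--     """Count number of operators in expression string."""
--     count: int = 0
--     i: int = 0
--     n: int = len(expr)
--     while i < n:
--         ch_code: int = ord(expr[i])
--         if ch_code == 43:
--             count = count + 1
--         elif ch_code == 45:
--             count = count + 1
--         elif ch_code == 42:
--             count = count + 1
--         elif ch_code == 47:
--             count = count + 1
--         i = i + 1
--     return count
-- ===== SOURCE B (Python) =====
-- def count_ops_in_expr(expr: str) -> int: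
--     """Count number of operators in expression string."""
--     counts = {}
--     for ch in expr:
--         counts[ch] = counts.get(ch, 0) + 1
--     return counts.get('+', 0) + counts.get('-', 0) + counts.get('*', 0) + counts.get('/', 0)
-- ===== Notes on version B (the rewrite author's own statement) =====
-- stated objective: idiomatic
-- what changed: Replaces the index-based while loop with an ord branch cascade by a one-pass character frequency table followed by four fixed lookups of the operator characters.
import Mathlib
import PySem

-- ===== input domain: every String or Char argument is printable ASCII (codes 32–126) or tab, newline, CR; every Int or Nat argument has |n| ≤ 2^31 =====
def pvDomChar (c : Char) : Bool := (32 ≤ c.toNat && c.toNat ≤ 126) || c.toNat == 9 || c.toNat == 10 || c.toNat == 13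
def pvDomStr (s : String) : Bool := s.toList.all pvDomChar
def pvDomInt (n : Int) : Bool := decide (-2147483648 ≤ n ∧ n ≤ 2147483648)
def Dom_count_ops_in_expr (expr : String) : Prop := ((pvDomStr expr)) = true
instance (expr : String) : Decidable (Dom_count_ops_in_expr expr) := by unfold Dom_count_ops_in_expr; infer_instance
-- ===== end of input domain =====

-- B replaces A's index-based while loop with the ord branch cascade by a one-pass
-- character frequency table followed by four fixed lookups (idiomatic; same cost).

-- ===== PORT A =====
-- index-based while loop: while i < n: ch_code = ord(expr[i]); branch cascade; i += 1
def count_ops_in_expr_go (s : List Char) (count : Int) (i : Nat) : Int :=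
  if h : i < s.length then
    let ch_code : Int := (s[i].toNat : Int)   -- ord(expr[i]); i < n so indexing is safe
    let count :=
      if ch_code = 43 then count + 1
      else if ch_code = 45 then count + 1
      else if ch_code = 42 then count + 1
      else if ch_code = 47 then count + 1
      else count
    count_ops_in_expr_go s count (i + 1)
  else count
termination_by s.length - i

def count_ops_in_expr (expr : String) : Int :=
  count_ops_in_expr_go expr.toList 0 0

-- ===== PORT B =====
-- counts[ch] = counts.get(ch, 0) + 1 over the string, then four lookups
def count_ops_in_expr_alt (expr : String) : Int :=
  let counts : PySem.Dict Char Int :=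
    expr.toList.foldl (fun d ch => d.insert ch (d.getD ch 0 + 1)) PySem.Dict.empty
  counts.getD '+' 0 + counts.getD '-' 0 + counts.getD '*' 0 + counts.getD '/' 0

-- ===== PRECONDITION & SPEC =====
def Spec_count_ops_in_expr (expr : String) (out : Int) : Prop := out = count_ops_in_expr_alt expr
instance (expr : String) (out : Int) : Decidable (Spec_count_ops_in_expr expr out) := by unfold Spec_count_ops_in_expr; infer_instance

-- ===== CLAIM (what is proved, stated in full; the proofs are below) =====
def Claim_equal_count_ops_in_expr : Prop := ∀ (expr : String), Dom_count_ops_in_expr expr → Spec_count_ops_in_expr expr (count_ops_in_expr expr)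

-- ===== LEMMAS AND PROOFS =====

theorem code_eq_iff (c : Char) (k : Char) :
    ((c.toNat : Int) = (k.toNat : Int)) ↔ c = k := by
  constructor
  · intro h
    have h' : c.toNat = k.toNat := by exact_mod_cast h
    exact Char.ext (by simpa [Char.toNat] using UInt32.toNat_inj.mp (by simpa using h'))
  · rintro rfl; rfl

theorem code43 (c : Char) : ((c.toNat : Int) = 43) ↔ c = '+' := code_eq_iff c '+'
theorem code45 (c : Char) : ((c.toNat : Int) = 45) ↔ c = '-' := code_eq_iff c '-'
theorem code42 (c : Char) : ((c.toNat : Int) = 42) ↔ c = '*' := code_eq_iff c '*'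
theorem code47 (c : Char) : ((c.toNat : Int) = 47) ↔ c = '/' := code_eq_iff c '/'

theorem count_ops_go_eq (s : List Char) (count : Int) (i : Nat) :
    count_ops_in_expr_go s count i =
      count + ((s.drop i).count '+' : Int) + ((s.drop i).count '-' : Int)
            + ((s.drop i).count '*' : Int) + ((s.drop i).count '/' : Int) := by
  fun_induction count_ops_in_expr_go s count i with
  | case1 count i hlt ch_code cnt ih =>
    have hd : s.drop i = s[i] :: s.drop (i + 1) := List.drop_eq_getElem_cons (by exact hlt)
    rw [ih, hd]
    simp only [cnt, ch_code, code43, code45, code42, code47, List.count_cons]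
    by_cases e1 : s[i] = '+' <;> by_cases e2 : s[i] = '-' <;> by_cases e3 : s[i] = '*' <;>
      by_cases e4 : s[i] = '/' <;> simp [e1, e2, e3, e4] <;> ring
  | case2 count i h =>
    have hnil : s.drop i = [] := List.drop_eq_nil_of_le (by omega)
    simp [hnil]

theorem count_ops_in_expr_spec : Claim_equal_count_ops_in_expr := by
  intro expr _
  unfold Spec_count_ops_in_expr count_ops_in_expr count_ops_in_expr_alt
  rw [count_ops_go_eq]
  simp [PySem.Dict.getD_foldl_insert_add_one, PySem.Dict.getD_empty]
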